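-- pv_equiv track=rewrite | github.com/zek12/challenges_from_Hackerrank | inversions.py | maxInversions
-- ===== SOURCE A (Python) =====
-- def maxInversions(arr):
--     n = len(arr)
--     count = 0
--
--     # Create arrays to store the number of elements greater than arr[i] to the left
--     # and the number of elements smaller than arr[i] to the right
--     greater_left = [0] * n
--     smaller_right = [0] * n
--
--     # Fill the greater_left array
--     for i in range(1, n):
--         for j in range(i):
--             if arr[j] > arr[i]:
--                 greater_left[i] += 1
--
--     # Fill the smaller_right array
--     for i in range(n - 2, -1, -1):
--         for j in range(i + 1, n):
--             if arr[j] < arr[i]: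
--                 smaller_right[i] += 1
--
--     # Calculate the number of inversions
--     for i in range(n):
--         count += greater_left[i] * smaller_right[i]
--
--     return count
-- ===== SOURCE B (Python) =====
-- # B: sorted-prefix/suffix with binary search (hand-written bisect, since the
-- # module imports nothing): for each position, the number of greater elements
-- # to the left / smaller elements to the right is read off a maintained sorted
-- # list in O(log n) comparisons instead of an O(n) rescan.
--
-- def _bisect_right(s, x):
--     lo, hi = 0, len(s)
--     while lo < hi:
--         mid = (lo + hi) // 2
--         if x < s[mid]:
--             hi = mid
--         else:
--             lo = mid + 1
--     return lo
--
-- def _bisect_left(s, x):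
--     lo, hi = 0, len(s)
--     while lo < hi:
--         mid = (lo + hi) // 2
--         if s[mid] < x:
--             lo = mid + 1
--         else:
--             hi = mid
--     return lo
--
-- def maxInversions(arr):
--     n = len(arr)
--     greater_left = []
--     pre = []
--     for x in arr:
--         p = _bisect_right(pre, x)
--         greater_left.append(len(pre) - p)
--         pre.insert(p, x)
--     total = 0
--     suf = []
--     for j in range(n - 1, -1, -1):
--         x = arr[j]
--         p = _bisect_left(suf, x)
--         total += greater_left[j] * p
--         suf.insert(p, x)
--     return total
-- ===== Notes on version B (the rewrite author's own statement) =====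
-- stated objective: faster
-- what changed: Replaces the two O(n^2) nested rescans (and the separate greater_left/smaller_right arrays plus final product pass) with sorted prefix/suffix lists maintained by insertion: each greater-to-the-left / smaller-to-the-right count is read off a hand-written binary search, and the products are accumulated in the second pass.
import Mathlib
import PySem

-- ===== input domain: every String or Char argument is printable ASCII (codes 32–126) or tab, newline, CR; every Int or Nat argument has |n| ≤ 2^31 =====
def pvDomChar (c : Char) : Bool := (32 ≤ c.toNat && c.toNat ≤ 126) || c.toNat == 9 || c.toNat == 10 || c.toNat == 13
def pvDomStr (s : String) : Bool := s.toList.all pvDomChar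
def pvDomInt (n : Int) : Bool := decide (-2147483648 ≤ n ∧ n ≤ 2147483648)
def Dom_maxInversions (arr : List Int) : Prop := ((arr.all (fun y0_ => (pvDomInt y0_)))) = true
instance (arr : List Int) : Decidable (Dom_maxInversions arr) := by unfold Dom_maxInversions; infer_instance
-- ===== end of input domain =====

-- B replaces A's two O(n^2) nested rescans by sorted prefix/suffix lists queried with binary search (objective: faster).

-- ===== PORT A =====
def maxInversions (arr : List Int) : Int :=
  let n : Int := arr.length
  let greater_left : List Int := List.replicate n.toNat 0
  let smaller_right : List Int := List.replicate n.toNat 0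
  let greater_left := (PySem.List.pyRange 1 n 1).foldl (fun gl i =>
    (PySem.List.pyRange 0 i 1).foldl (fun gl j =>
      if PySem.List.pyGetD arr j 0 > PySem.List.pyGetD arr i 0 then
        PySem.List.pySetD gl i (PySem.List.pyGetD gl i 0 + 1)
      else gl) gl) greater_left
  let smaller_right := (PySem.List.pyRange (n - 2) (-1) (-1)).foldl (fun sr i =>
    (PySem.List.pyRange (i + 1) n 1).foldl (fun sr j =>
      if PySem.List.pyGetD arr j 0 < PySem.List.pyGetD arr i 0 then
        PySem.List.pySetD sr i (PySem.List.pyGetD sr i 0 + 1)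
      else sr) sr) smaller_right
  (PySem.List.pyRange 0 n 1).foldl (fun count i =>
    count + PySem.List.pyGetD greater_left i 0 * PySem.List.pyGetD smaller_right i 0) 0

-- ===== PORT B =====
-- Source B's hand-written _bisect_right/_bisect_left are the standard lo/hi binary-search
-- loops, which is exactly what PySem.List.bisectRight/bisectLeft compute.
def maxInversions_alt (arr : List Int) : Int :=
  let n : Int := arr.length
  let st1 := arr.foldl (fun (st : List Int × List Int) x =>
    let p := PySem.List.bisectRight st.2 x
    (st.1 ++ [(st.2.length : Int) - p], PySem.List.insert st.2 (p : Int) x)) ([], [])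
  let greater_left := st1.1
  let st2 := (PySem.List.pyRange (n - 1) (-1) (-1)).foldl (fun (st : Int × List Int) j =>
    let x := PySem.List.pyGetD arr j 0
    let p := PySem.List.bisectLeft st.2 x
    (st.1 + PySem.List.pyGetD greater_left j 0 * (p : Int),
     PySem.List.insert st.2 (p : Int) x)) (0, [])
  st2.1

-- ===== PRECONDITION & SPEC =====
def Spec_maxInversions (arr : List Int) (out : Int) : Prop := out = maxInversions_alt arr
instance (arr : List Int) (out : Int) : Decidable (Spec_maxInversions arr out) := by unfold Spec_maxInversions; infer_instance

-- ===== CLAIM (what is proved, stated in full; the proofs are below) =====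
def Claim_equal_maxInversions : Prop := ∀ (arr : List Int), Dom_maxInversions arr → Spec_maxInversions arr (maxInversions arr)

-- ===== LEMMAS AND PROOFS =====

-- number of elements of t greater than x / smaller than x, as Int
def cntGT (t : List Int) (x : Int) : Int := (t.countP (fun y => decide (x < y)) : Int)
def cntLT (t : List Int) (x : Int) : Int := (t.countP (fun y => decide (y < x)) : Int)
-- per-index specs: greater to the left of index k / smaller to the right of index k
def GLs (a : List Int) (k : Nat) : Int := cntGT (a.take k) (a.getD k 0)
def SRs (a : List Int) (k : Nat) : Int := cntLT (a.drop (k+1)) (a.getD k 0)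

-- counting a predicate that flips at a boundary index
lemma countP_of_boundary (p : Int → Bool) : ∀ (s : List Int) (r : Nat), r ≤ s.length →
    (∀ (j : Nat) (hj : j < s.length), j < r → p s[j] = true) →
    (∀ (j : Nat) (hj : j < s.length), r ≤ j → p s[j] = false) →
    s.countP p = r := by
  intro s
  induction s with
  | nil => intro r hr _ _; simp at hr ⊢; omega
  | cons y t ih =>
    intro r hr h1 h2
    cases r with
    | zero =>
      have hy : p y = false := h2 0 (by simp) (by omega)
      have ht : t.countP p = 0 := by
        apply ih 0 (by omega) (by omega)
        intro j hj _
        simpa using h2 (j+1) (by simpa using hj) (by omega)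
      simp [hy, ht]
    | succ r' =>
      have hy : p y = true := by simpa using h1 0 (by simp) (by omega)
      have ht : t.countP p = r' := by
        apply ih r' (by simpa using hr)
        · intro j hj hjr
          simpa using h1 (j+1) (by simpa using hj) (by omega)
        · intro j hj hjr
          simpa using h2 (j+1) (by simpa using hj) (by omega)
      simp [hy, ht]

lemma bisectLeft_countP (s : List Int) (x : Int) (hs : s.Pairwise (· ≤ ·)) :
    s.countP (fun y => decide (y < x)) = PySem.List.bisectLeft s x := by
  obtain ⟨hle, hlt, hge⟩ := PySem.List.bisectLeft_spec s x hs
  apply countP_of_boundary _ s _ hle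
  · intro j hj hjr; simpa using hlt j hj hjr
  · intro j hj hjr; simpa using hge j hj hjr

lemma bisectRight_countP (s : List Int) (x : Int) (hs : s.Pairwise (· ≤ ·)) :
    s.countP (fun y => decide (¬ x < y)) = PySem.List.bisectRight s x := by
  obtain ⟨hle, hlt, hge⟩ := PySem.List.bisectRight_spec s x hs
  apply countP_of_boundary _ s _ hle
  · intro j hj hjr; simpa using hlt j hj hjr
  · intro j hj hjr; simpa using hge j hj hjr

lemma bisectRight_countP' (s : List Int) (x : Int) (hs : s.Pairwise (· ≤ ·)) :
    s.countP (fun y => decide (x < y)) = s.length - PySem.List.bisectRight s x := by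
  have h := bisectRight_countP s x hs
  have h2 : s.countP (fun y => decide (x < y)) + s.countP (fun y => decide (¬ x < y)) = s.length := by
    have := List.length_eq_countP_add_countP (p := fun y => decide (x < y)) (l := s)
    have hc : List.countP (fun y => decide (¬ x < y)) s
        = List.countP (fun a => decide (¬ decide (x < a) = true)) s := by
      apply List.countP_congr; intro a _; simp
    omega
  omega

-- inserting at a boundary position keeps the list sorted and is a push-front up to permutation
lemma insert_sorted_perm (s : List Int) (x : Int) (r : Nat) (hr : r ≤ s.length)
    (hs : s.Pairwise (· ≤ ·))
    (h1 : ∀ (j : Nat) (hj : j < s.length), j < r → s[j] ≤ x)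
    (h2 : ∀ (j : Nat) (hj : j < s.length), r ≤ j → x ≤ s[j]) :
    (PySem.List.insert s (r : Int) x).Pairwise (· ≤ ·) ∧
      (PySem.List.insert s (r : Int) x).Perm (x :: s) := by
  rw [PySem.List.insert_natCast s r x hr]
  constructor
  · rw [List.pairwise_append]
    refine ⟨hs.sublist (List.take_sublist r s), ?_, ?_⟩
    · rw [List.pairwise_cons]
      refine ⟨?_, hs.sublist (List.drop_sublist r s)⟩
      intro b hb
      obtain ⟨k, hk, rfl⟩ := List.mem_iff_getElem.mp hb
      rw [List.getElem_drop]
      exact h2 (r + k) (by simp at hk; omega) (by omega)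
    · intro a ha b hb
      obtain ⟨k, hk, rfl⟩ := List.mem_iff_getElem.mp ha
      have hax : (s.take r)[k]'hk ≤ x := by
        rw [List.getElem_take]
        exact h1 k (by simp at hk; omega) (by simp at hk; omega)
      rcases List.mem_cons.mp hb with rfl | hb2
      · exact hax
      · obtain ⟨m, hm, rfl⟩ := List.mem_iff_getElem.mp hb2
        rw [List.getElem_take, List.getElem_drop]
        have h2' : x ≤ s[r + m]'(by simp at hm; omega) := h2 (r + m) (by simp at hm; omega) (by omega)
        calc s[k]'(by simp at hk; omega) ≤ x := by rw [List.getElem_take] at hax; exact hax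
          _ ≤ s[r + m]'(by simp at hm; omega) := h2'
  · calc (s.take r ++ x :: s.drop r).Perm (x :: (s.take r ++ s.drop r)) := List.perm_middle
      _ = x :: s := by rw [List.take_append_drop]

lemma insert_bisectRight (s : List Int) (x : Int) (hs : s.Pairwise (· ≤ ·)) :
    (PySem.List.insert s ((PySem.List.bisectRight s x : Nat) : Int) x).Pairwise (· ≤ ·) ∧
      (PySem.List.insert s ((PySem.List.bisectRight s x : Nat) : Int) x).Perm (x :: s) := by
  obtain ⟨hle, hlt, hge⟩ := PySem.List.bisectRight_spec s x hs
  exact insert_sorted_perm s x _ hle hs (fun j hj hjr => hlt j hj hjr)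
    (fun j hj hjr => le_of_lt (hge j hj hjr))

lemma insert_bisectLeft (s : List Int) (x : Int) (hs : s.Pairwise (· ≤ ·)) :
    (PySem.List.insert s ((PySem.List.bisectLeft s x : Nat) : Int) x).Pairwise (· ≤ ·) ∧
      (PySem.List.insert s ((PySem.List.bisectLeft s x : Nat) : Int) x).Perm (x :: s) := by
  obtain ⟨hle, hlt, hge⟩ := PySem.List.bisectLeft_spec s x hs
  exact insert_sorted_perm s x _ hle hs (fun j hj hjr => le_of_lt (hlt j hj hjr))
    (fun j hj hjr => hge j hj hjr)

-- ---- B, first loop (the step function of maxInversions_alt's first fold, definitionally) ----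
def bstep1 : (List Int × List Int) → Int → (List Int × List Int) := fun st x =>
  let p := PySem.List.bisectRight st.2 x
  (st.1 ++ [(st.2.length : Int) - p], PySem.List.insert st.2 (p : Int) x)

lemma b_loop1 : ∀ (l t g pre : List Int), pre.Pairwise (· ≤ ·) → pre.Perm t →
    (l.foldl bstep1 (g, pre)).1
        = g ++ (List.range l.length).map (fun k => cntGT (t ++ l.take k) (l.getD k 0))
      ∧ (l.foldl bstep1 (g, pre)).2.Pairwise (· ≤ ·)
      ∧ (l.foldl bstep1 (g, pre)).2.Perm (t ++ l) := by
  intro l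
  induction l with
  | nil =>
    intro t g pre hs hp
    refine ⟨by simp, by simpa using hs, by simpa using hp⟩
  | cons x l' ih =>
    intro t g pre hs hp
    have hble : PySem.List.bisectRight pre x ≤ pre.length :=
      (PySem.List.bisectRight_spec pre x hs).1
    have hval : (pre.length : Int) - (PySem.List.bisectRight pre x : Int) = cntGT t x := by
      have h1 := bisectRight_countP' pre x hs
      have h2 : pre.countP (fun y => decide (x < y)) = t.countP (fun y => decide (x < y)) :=
        hp.countP_congr (fun a _ => rfl)
      unfold cntGT
      omega
    have hnew : bstep1 (g, pre) x
        = (g ++ [cntGT t x],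
           PySem.List.insert pre ((PySem.List.bisectRight pre x : Nat) : Int) x) := by
      unfold bstep1
      simp only
      rw [hval]
    obtain ⟨hs', hp'⟩ := insert_bisectRight pre x hs
    have hp'' : (PySem.List.insert pre ((PySem.List.bisectRight pre x : Nat) : Int) x).Perm
        (t ++ [x]) := hp'.trans ((hp.cons x).trans (List.perm_append_singleton x t).symm)
    obtain ⟨ih1, ih2, ih3⟩ := ih (t ++ [x]) (g ++ [cntGT t x]) _ hs' hp''
    rw [List.foldl_cons, hnew]
    refine ⟨?_, ih2, by simpa using ih3⟩
    rw [ih1]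
    have hmap : (List.range (x :: l').length).map
          (fun k => cntGT (t ++ (x :: l').take k) ((x :: l').getD k 0))
        = cntGT t x :: (List.range l'.length).map
            (fun k => cntGT (t ++ [x] ++ l'.take k) (l'.getD k 0)) := by
      simp only [List.length_cons]
      rw [List.range_succ_eq_map, List.map_cons, List.map_map]
      congr 1
      · simp
      apply List.map_congr_left
      intro k _
      simp [Function.comp, List.append_assoc]
    rw [hmap]
    simp

-- ---- B, second loop (the step function of maxInversions_alt's second fold, definitionally) ----
def bstep2 (arr gl : List Int) : (Int × List Int) → Int → (Int × List Int) := fun st j =>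
  let x := PySem.List.pyGetD arr j 0
  let p := PySem.List.bisectLeft st.2 x
  (st.1 + PySem.List.pyGetD gl j 0 * (p : Int), PySem.List.insert st.2 (p : Int) x)

lemma b_loop2 (arr gl : List Int) : ∀ (m : Nat), m ≤ arr.length →
    ∀ (total : Int) (suf : List Int), suf.Pairwise (· ≤ ·) → suf.Perm (arr.drop m) →
    ((PySem.List.pyRange ((m : Int) - 1) (-1) (-1)).foldl (bstep2 arr gl) (total, suf)).1
      = total + ∑ k ∈ Finset.range m, gl.getD k 0 * SRs arr k := by
  intro m
  induction m with
  | zero =>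
    intro _ total suf _ _
    rw [PySem.List.pyRange_neg_one_eq_nil (by norm_num)]
    simp
  | succ m ih =>
    intro hm total suf hs hp
    have hmlt : m < arr.length := by omega
    have hcast : ((m + 1 : Nat) : Int) - 1 = (m : Int) := by push_cast; ring
    rw [hcast, PySem.List.pyRange_neg_one_cons (by omega), List.foldl_cons]
    have hx : PySem.List.pyGetD arr (m : Int) 0 = arr.getD m 0 := by
      simp [PySem.List.pyGetD_natCast]
    have hgl : PySem.List.pyGetD gl (m : Int) 0 = gl.getD m 0 := by
      simp [PySem.List.pyGetD_natCast]
    have hpcnt : ((PySem.List.bisectLeft suf (arr.getD m 0) : Nat) : Int) = SRs arr m := by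
      rw [← bisectLeft_countP suf _ hs]
      unfold SRs cntLT
      congr 1
      exact hp.countP_congr (fun a _ => rfl)
    obtain ⟨hs', hp'⟩ := insert_bisectLeft suf (arr.getD m 0) hs
    have hdrop : (arr.getD m 0) :: arr.drop (m + 1) = arr.drop m := by
      rw [List.getD_eq_getElem arr 0 hmlt, ← List.drop_eq_getElem_cons hmlt]
    have hp'' : (PySem.List.insert suf ((PySem.List.bisectLeft suf (arr.getD m 0) : Nat) : Int)
        (arr.getD m 0)).Perm (arr.drop m) := by
      refine hp'.trans ?_
      rw [← hdrop]
      exact hp.cons _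
    have hstep : bstep2 arr gl (total, suf) (m : Int)
        = (total + gl.getD m 0 * SRs arr m,
           PySem.List.insert suf ((PySem.List.bisectLeft suf (arr.getD m 0) : Nat) : Int)
             (arr.getD m 0)) := by
      unfold bstep2
      simp only [hx, hgl, hpcnt]
    rw [hstep, ih (by omega) _ _ hs' hp'']
    rw [Finset.sum_range_succ]
    ring

-- ---- A, generic inner bump loop: repeated `g[t] += 1` under a condition ----
lemma getD_set' (l : List Int) (n k : Nat) (a : Int) (hn : n < l.length) :
    (l.set n a).getD k 0 = if k = n then a else l.getD k 0 := by
  by_cases h : k = n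
  · subst h; rw [List.getD_eq_getElem _ 0 (by simpa using hn)]; simp [List.getElem_set_self]
  · simp only [h, if_false, List.getD]
    rw [List.getElem?_set_ne (by omega)]

lemma foldl_bump (cond : Int → Prop) [DecidablePred cond] : ∀ (L : List Int) (g : List Int) (t : Nat),
    t < g.length →
    L.foldl (fun g j => if cond j then
        PySem.List.pySetD g (t : Int) (PySem.List.pyGetD g (t : Int) 0 + 1) else g) g
      = PySem.List.pySetD g (t : Int)
          (PySem.List.pyGetD g (t : Int) 0 + (L.countP (fun j => decide (cond j)) : Int)) := by
  intro L
  induction L with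
  | nil =>
    intro g t hlen
    simp only [List.foldl_nil, List.countP_nil, Nat.cast_zero, add_zero,
      PySem.List.pySetD_natCast, PySem.List.pyGetD_natCast]
    rw [List.getD_eq_getElem g 0 hlen]
    exact (List.set_getElem_self hlen).symm
  | cons j L' ih =>
    intro g t hlen
    rw [List.foldl_cons]
    by_cases hc : cond j
    · rw [if_pos hc]
      have hlen' : t < (PySem.List.pySetD g (t : Int) (PySem.List.pyGetD g (t : Int) 0 + 1)).length := by
        simpa [PySem.List.pySetD_natCast] using hlen
      rw [ih _ t hlen']
      simp only [PySem.List.pySetD_natCast, PySem.List.pyGetD_natCast]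
      rw [List.set_set]
      congr 1
      rw [List.getD_eq_getElem _ 0 (by simpa using hlen), List.getElem_set_self (by simpa using hlen),
        List.getD_eq_getElem g 0 hlen, List.countP_cons]
      simp [hc]
      ring
    · rw [if_neg hc, ih _ t hlen]
      congr 2
      rw [List.countP_cons]
      simp [hc]

-- counting over a prefix equals counting over its index range
lemma countP_take_range (arr : List Int) (p : Int → Bool) : ∀ (m : Nat), m ≤ arr.length →
    (arr.take m).countP p = (List.range m).countP (fun k => p (arr.getD k 0)) := by
  intro m
  induction m with
  | zero => simp
  | succ m ih =>
    intro hm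
    rw [List.take_succ_eq_append_getElem (by omega), List.countP_append,
      List.range_succ, List.countP_append, ih (by omega)]
    have h2 : arr[m]?.getD 0 = arr[m]'(by omega) := by
      rw [List.getElem?_eq_getElem (show m < arr.length by omega)]
      rfl
    simp [List.countP_cons, h2]

-- ---- A, greater_left loop ----
def astep1 (arr : List Int) : List Int → Int → List Int := fun gl i =>
  (PySem.List.pyRange 0 i 1).foldl (fun gl j =>
    if PySem.List.pyGetD arr j 0 > PySem.List.pyGetD arr i 0 then
      PySem.List.pySetD gl i (PySem.List.pyGetD gl i 0 + 1)
    else gl) gl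

lemma astep1_char (arr : List Int) (g : List Int) (m : Nat) (hm : m < arr.length)
    (hg : g.length = arr.length) :
    astep1 arr g (m : Nat) = g.set m (g.getD m 0 + GLs arr m) := by
  unfold astep1
  rw [foldl_bump _ _ g m (by omega)]
  have hcnt : (PySem.List.pyRange 0 (m : Int) 1).countP
        (fun j => decide (PySem.List.pyGetD arr j 0 > arr.getD m 0))
      = (arr.take m).countP (fun y => decide (arr.getD m 0 < y)) := by
    rw [PySem.List.pyRange_zero_nat m, List.countP_map, countP_take_range arr _ m (by omega)]
    apply List.countP_congr
    intro k _
    simp [PySem.List.pyGetD_natCast]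
  simp only [PySem.List.pySetD_natCast, PySem.List.pyGetD_natCast]
  rw [hcnt]
  unfold GLs cntGT
  rfl

lemma a_loop1 (arr : List Int) : ∀ (m : Nat), m ≤ arr.length →
    ∀ (g : List Int), g.length = arr.length →
    ((PySem.List.pyRange 1 (m : Int) 1).foldl (astep1 arr) g).length = arr.length
    ∧ ∀ (k : Nat), k < arr.length →
      ((PySem.List.pyRange 1 (m : Int) 1).foldl (astep1 arr) g).getD k 0
        = if 1 ≤ k ∧ k < m then g.getD k 0 + GLs arr k else g.getD k 0 := by
  intro m
  induction m with
  | zero =>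
    intro _ g hg
    rw [PySem.List.pyRange_one_eq_nil (by norm_num)]
    refine ⟨by simpa using hg, ?_⟩
    intro k _
    have : ¬ (1 ≤ k ∧ k < 0) := by omega
    rw [if_neg this]
    simp
  | succ m ih =>
    intro hm g hg
    by_cases hm0 : m = 0
    · subst hm0
      rw [PySem.List.pyRange_one_eq_nil (by norm_num)]
      refine ⟨by simpa using hg, ?_⟩
      intro k _
      have : ¬ (1 ≤ k ∧ k < 0 + 1) := by omega
      rw [if_neg this]
      simp
    · have hcast : ((m + 1 : Nat) : Int) = (m : Int) + 1 := by push_cast; ring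
      rw [hcast, PySem.List.pyRange_one_succ_right (by omega), List.foldl_append,
        List.foldl_cons, List.foldl_nil]
      obtain ⟨ihlen, ihget⟩ := ih (by omega) g hg
      set prev := (PySem.List.pyRange 1 (m : Int) 1).foldl (astep1 arr) g with hprev
      have hstep : astep1 arr prev (m : Nat) = prev.set m (prev.getD m 0 + GLs arr m) :=
        astep1_char arr prev m (by omega) ihlen
      rw [hstep]
      constructor
      · simpa using ihlen
      · intro k hk
        rw [getD_set' prev m k _ (by omega)]
        by_cases hkm : k = m
        · subst hkm
          rw [if_pos rfl, ihget k hk]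
          have hc1 : ¬ (1 ≤ k ∧ k < k) := by omega
          have hc2 : (1 ≤ k ∧ k < k + 1) := by omega
          simp [hc2]
        · rw [if_neg hkm, ihget k hk]
          by_cases hc : 1 ≤ k ∧ k < m
          · rw [if_pos hc, if_pos (by omega : 1 ≤ k ∧ k < m + 1)]
          · rw [if_neg hc, if_neg (by omega : ¬ (1 ≤ k ∧ k < m + 1))]

-- ---- A, smaller_right loop ----
def astep2 (arr : List Int) : List Int → Int → List Int := fun sr i =>
  (PySem.List.pyRange (i + 1) (arr.length : Int) 1).foldl (fun sr j =>
    if PySem.List.pyGetD arr j 0 < PySem.List.pyGetD arr i 0 then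
      PySem.List.pySetD sr i (PySem.List.pyGetD sr i 0 + 1)
    else sr) sr

lemma astep2_char (arr : List Int) (g : List Int) (m : Nat) (hm : m < arr.length)
    (hg : g.length = arr.length) :
    astep2 arr g (m : Nat) = g.set m (g.getD m 0 + SRs arr m) := by
  unfold astep2
  rw [foldl_bump _ _ g m (by omega)]
  have hcnt : (PySem.List.pyRange ((m : Int) + 1) (arr.length : Int) 1).countP
        (fun j => decide (PySem.List.pyGetD arr j 0 < arr.getD m 0))
      = (arr.drop (m + 1)).countP (fun y => decide (y < arr.getD m 0)) := by
    rw [show (fun j => decide (PySem.List.pyGetD arr j 0 < arr.getD m 0))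
        = ((fun y => decide (y < arr.getD m 0)) ∘ (fun j => PySem.List.pyGetD arr j 0)) from rfl]
    rw [← List.countP_map]
    rw [PySem.List.map_pyGetD_pyRange' arr 0 (by positivity : (0:Int) ≤ (m:Int)+1)]
    norm_num
  simp only [PySem.List.pySetD_natCast, PySem.List.pyGetD_natCast]
  rw [hcnt]
  unfold SRs cntLT
  rfl

lemma a_loop2 (arr : List Int) : ∀ (m : Nat), m ≤ arr.length →
    ∀ (g : List Int), g.length = arr.length →
    ((PySem.List.pyRange ((m : Int) - 1) (-1) (-1)).foldl (astep2 arr) g).length = arr.length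
    ∧ ∀ (k : Nat), k < arr.length →
      ((PySem.List.pyRange ((m : Int) - 1) (-1) (-1)).foldl (astep2 arr) g).getD k 0
        = if k < m then g.getD k 0 + SRs arr k else g.getD k 0 := by
  intro m
  induction m with
  | zero =>
    intro _ g hg
    rw [PySem.List.pyRange_neg_one_eq_nil (by norm_num)]
    refine ⟨by simpa using hg, ?_⟩
    intro k _
    rw [if_neg (by omega : ¬ k < 0)]
    simp
  | succ m ih =>
    intro hm g hg
    have hcast : ((m + 1 : Nat) : Int) - 1 = (m : Int) := by push_cast; ring
    rw [hcast, PySem.List.pyRange_neg_one_cons (by omega), List.foldl_cons]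
    have hstep : astep2 arr g (m : Nat) = g.set m (g.getD m 0 + SRs arr m) :=
      astep2_char arr g m (by omega) hg
    rw [hstep]
    obtain ⟨ihlen, ihget⟩ := ih (by omega) (g.set m (g.getD m 0 + SRs arr m)) (by simpa using hg)
    refine ⟨ihlen, ?_⟩
    intro k hk
    rw [ihget k hk, getD_set' g m k _ (by omega)]
    by_cases hkm : k = m
    · subst hkm
      rw [if_neg (by omega : ¬ k < k), if_pos rfl, if_pos (by omega : k < k + 1)]
    · by_cases hc : k < m
      · rw [if_pos hc, if_neg hkm, if_pos (by omega : k < m + 1)]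
      · rw [if_neg hc, if_neg hkm, if_neg (by omega : ¬ k < m + 1)]

-- ---- A, final summation loop ----
lemma a_loop3 (gl sr : List Int) : ∀ (n : Nat),
    (PySem.List.pyRange 0 (n : Int) 1).foldl (fun c i =>
        c + PySem.List.pyGetD gl i 0 * PySem.List.pyGetD sr i 0) 0
      = ∑ k ∈ Finset.range n, gl.getD k 0 * sr.getD k 0 := by
  intro n
  rw [PySem.List.foldl_add _ (fun i => PySem.List.pyGetD gl i 0 * PySem.List.pyGetD sr i 0) 0]
  rw [PySem.List.pyRange_zero_nat n, List.map_map]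
  rw [show ((fun i => PySem.List.pyGetD gl i 0 * PySem.List.pyGetD sr i 0) ∘ (fun k : Nat => (k : Int)))
      = (fun k : Nat => gl.getD k 0 * sr.getD k 0) from by
    funext k; simp [PySem.List.pyGetD_natCast]]
  rw [zero_add]
  induction n with
  | zero => simp
  | succ n ihn => rw [List.range_succ, List.map_append, List.sum_append, Finset.sum_range_succ, ihn]; simp

-- ===== VERDICT (by name: the statement is the Claim_ definition above) =====
theorem maxInversions_spec : Claim_equal_maxInversions := by
  unfold Claim_equal_maxInversions
  intro arr _
  unfold Spec_maxInversions
  by_cases h0 : arr.length = 0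
  · rw [List.length_eq_zero_iff.mp h0]
    decide
  · have hn : 1 ≤ arr.length := by omega
    -- ---- A side ----
    have hrep : ∀ k : Nat, (List.replicate arr.length (0 : Int)).getD k 0 = 0 := by
      intro k
      by_cases hk : k < arr.length
      · rw [List.getD_eq_getElem _ 0 (by simpa using hk)]; simp
      · rw [List.getD_eq_default _ 0 (by simpa using hk)]
    have hglA := a_loop1 arr arr.length le_rfl (List.replicate arr.length 0)
      (by simp)
    set glA := (PySem.List.pyRange 1 (arr.length : Int) 1).foldl (astep1 arr)
      (List.replicate arr.length (0 : Int)) with hglAdef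
    have hsr_range : (arr.length : Int) - 2 = ((arr.length - 1 : Nat) : Int) - 1 := by
      push_cast [hn]; ring
    have hsrA := a_loop2 arr (arr.length - 1) (by omega) (List.replicate arr.length 0)
      (by simp)
    set srA := (PySem.List.pyRange (((arr.length - 1 : Nat) : Int) - 1) (-1) (-1)).foldl (astep2 arr)
      (List.replicate arr.length (0 : Int)) with hsrAdef
    have hA : maxInversions arr
        = (PySem.List.pyRange 0 (arr.length : Int) 1).foldl (fun c i =>
            c + PySem.List.pyGetD glA i 0 * PySem.List.pyGetD srA i 0) 0 := by
      rw [hglAdef, hsrAdef, ← hsr_range]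
      rfl
    rw [hA, a_loop3 glA srA arr.length]
    -- ---- B side ----
    have hb1 := b_loop1 arr [] [] [] List.Pairwise.nil (List.Perm.refl [])
    set glB := (arr.foldl bstep1 ([], [])).1 with hglBdef
    have hglB : glB = (List.range arr.length).map (fun k => GLs arr k) := by
      rw [hb1.1]
      simp [GLs]
    have hb2 := b_loop2 arr glB arr.length le_rfl 0 [] List.Pairwise.nil
      (by rw [List.drop_length])
    have hB : maxInversions_alt arr
        = ((PySem.List.pyRange ((arr.length : Int) - 1) (-1) (-1)).foldl (bstep2 arr glB)
            (0, ([] : List Int))).1 := rfl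
    rw [hB, hb2, zero_add]
    -- ---- both are Σ GLs·SRs ----
    apply Finset.sum_congr rfl
    intro k hk
    have hkn : k < arr.length := Finset.mem_range.mp hk
    have hglBk : glB.getD k 0 = GLs arr k := by
      rw [hglB, PySem.List.getD_map_range _ _ _ _ hkn]
    rw [hglBk, (hglA.2 k hkn), (hsrA.2 k hkn), hrep k]
    by_cases hk0 : k = 0
    · subst hk0
      have : GLs arr 0 = 0 := by simp [GLs, cntGT]
      rw [this]
      ring_nf
      rw [if_neg (by omega : ¬ (1 ≤ 0 ∧ 0 < arr.length))]
      ring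
    · rw [if_pos (by omega : 1 ≤ k ∧ k < arr.length), zero_add]
      by_cases hkl : k < arr.length - 1
      · rw [if_pos hkl, zero_add]
      · have hke : k = arr.length - 1 := by omega
        have hSR0 : SRs arr k = 0 := by
          unfold SRs cntLT
          rw [show k + 1 = arr.length by omega, List.drop_length]
          simp
        rw [if_neg hkl, hSR0]
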